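-- pv_equiv track=rewrite | github.com/flawas/I.BA_DMATH.H2202 | QuadratischeRestzahlen.py | quadratic_remainders
-- ===== SOURCE A (Python) =====
-- def euler_phi_numbers(n):
--     zn = [x for x in range(n)]
--     relatives_primes = []
--     for i in zn:
--         if ggt(n, zn[i])==1:
--             relatives_primes.append(zn[i])
--         else:
--             continue
--     return relatives_primes
--
-- def ggt(x , y):
--     if y == 0:
--         return x
--     return ggt(y, x % y)
--
-- def quadratic_remainders(n):
--     remainders = []
--     Z_n = euler_phi_numbers(n)
--     for i in Z_n:
--         remainders.append(i ** 2 % n)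
--     quadratic_remainders_dict = dict.fromkeys(sorted(Z_n))
--     # Leere listen erstellen
--     for key in quadratic_remainders_dict.keys():
--         quadratic_remainders_dict[key] = []
--     # Ordne x quadrate den Restklassen zu
--     for remainder_index in range(0, len(remainders)):
--         quadratic_remainders_dict[remainders[remainder_index]].append(Z_n[remainder_index])
--     # Entferne leere Restklassen
--     for key in list(quadratic_remainders_dict.keys()):
--         if quadratic_remainders_dict[key] == []:
--             quadratic_remainders_dict.pop(key)
--     return remainders, quadratic_remainders_dict, Z_n
-- ===== SOURCE B (Python) =====
-- def quadratic_remainders(n):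
--     # Sieve: mark every multiple of every divisor d>=2 of n as non-coprime,
--     # then read Z_n off the boolean array; group squares in one pass and sort once.
--     coprime = [True] * n
--     for d in range(2, n + 1):
--         if n % d == 0:
--             for j in range(0, n, d):
--                 coprime[j] = False
--     Z_n = [x for x in range(n) if coprime[x]]
--     remainders = [x * x % n for x in Z_n]
--     groups = {}
--     for x in Z_n:
--         groups.setdefault(x * x % n, []).append(x)
--     qdict = dict(sorted(groups.items(), key=lambda kv: kv[0]))
--     return remainders, qdict, Z_n
-- ===== Notes on version B (the rewrite author's own statement) =====
-- stated objective: faster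
-- what changed: Replaces the per-element recursive-gcd coprimality test with a divisor sieve over a boolean array (mark multiples of every divisor d>=2 of n), and builds the residue dict by one setdefault-grouping pass plus a single sort instead of fromkeys + fill + append + pop-empties passes.
import Mathlib
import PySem

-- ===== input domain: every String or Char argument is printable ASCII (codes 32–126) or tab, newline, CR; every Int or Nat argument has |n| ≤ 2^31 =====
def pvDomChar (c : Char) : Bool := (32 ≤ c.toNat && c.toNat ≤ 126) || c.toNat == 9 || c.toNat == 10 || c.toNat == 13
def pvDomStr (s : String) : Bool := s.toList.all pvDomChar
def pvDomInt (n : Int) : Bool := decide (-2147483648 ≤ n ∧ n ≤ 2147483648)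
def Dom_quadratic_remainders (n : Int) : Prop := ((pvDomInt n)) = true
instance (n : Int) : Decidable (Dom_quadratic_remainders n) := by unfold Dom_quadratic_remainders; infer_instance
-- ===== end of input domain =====

-- B replaces the per-element recursive-gcd test by a divisor sieve and builds the
-- residue classes by one grouping pass plus a single sort (objective: faster, constant factor).

-- ===== PORT A =====
theorem ggt_term (x y : Int) (hy : ¬ y = 0) : (PySem.Int.mod x y).natAbs < y.natAbs := by
  rcases lt_or_gt_of_ne hy with h | h
  · have := PySem.Int.mod_neg_bounds x h
    omega
  · have h1 := PySem.Int.mod_nonneg x h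
    have h2 := PySem.Int.mod_lt x h
    omega

def ggt (x y : Int) : Int :=
  if h : y = 0 then x else ggt y (PySem.Int.mod x y)
termination_by y.natAbs
decreasing_by exact ggt_term x y h

def euler_phi_numbers (n : Int) : List Int :=
  let zn := PySem.List.pyRange 0 n
  zn.foldl (fun acc i =>
    if ggt n (PySem.List.pyGetD zn i 0) = 1 then acc ++ [PySem.List.pyGetD zn i 0] else acc) []

def quadratic_remainders (n : Int) : List Int × (List (Int × List Int)) × List Int :=
  let Z_n := euler_phi_numbers n
  let remainders := Z_n.foldl (fun acc i => acc ++ [PySem.Int.mod (i ^ 2) n]) []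
  -- dict.fromkeys(sorted(Z_n)): the None placeholder is typed as [] here; the very next
  -- Python loop overwrites every value with [] before any value is read.
  let d0 : PySem.Dict Int (List Int) :=
    (PySem.List.sorted Z_n (fun x => x)).foldl (fun d k => d.insert k []) PySem.Dict.empty
  let d1 := d0.keys.foldl (fun d key => d.insert key []) d0
  -- dict[remainders[ri]].append(Z_n[ri]); the key is always present (KeyError unreachable)
  let d2 := (PySem.List.pyRange 0 (PySem.List.len remainders)).foldl
    (fun d ri => d.modify (PySem.List.pyGetD remainders ri 0) []
        (fun v => v ++ [PySem.List.pyGetD Z_n ri 0])) d1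
  let d3 := d2.keys.foldl (fun d key => if d.getD key [] = [] then d.erase key else d) d2
  (remainders, d3.items, Z_n)

-- ===== PORT B =====
def quadratic_remainders_alt (n : Int) : List Int × (List (Int × List Int)) × List Int :=
  let coprime := (PySem.List.pyRange 2 (n + 1)).foldl
    (fun c d => if PySem.Int.mod n d = 0
      then (PySem.List.pyRange 0 n d).foldl (fun c j => PySem.List.pySetD c j false) c
      else c)
    (PySem.List.pyRepeat [true] n)
  let Z_n := (PySem.List.pyRange 0 n).filter (fun x => PySem.List.pyGetD coprime x false)
  let remainders := Z_n.map (fun x => PySem.Int.mod (x * x) n)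
  -- groups.setdefault(x*x % n, []).append(x)  ==  modify with default []
  let groups := Z_n.foldl
    (fun d x => d.modify (PySem.Int.mod (x * x) n) [] (fun v => v ++ [x]))
    (PySem.Dict.empty : PySem.Dict Int (List Int))
  let qitems := PySem.List.sorted groups.items (fun p => p.1)
  (remainders, qitems, Z_n)

-- ===== PRECONDITION & SPEC =====
def Spec_quadratic_remainders (n : Int) (out : List Int × (List (Int × List Int)) × List Int) : Prop := out = quadratic_remainders_alt n
instance (n : Int) (out : List Int × (List (Int × List Int)) × List Int) : Decidable (Spec_quadratic_remainders n out) := by unfold Spec_quadratic_remainders; infer_instance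

-- ===== CLAIM (what is proved, stated in full; the proofs are below) =====
def Claim_equal_quadratic_remainders : Prop := ∀ (n : Int), Dom_quadratic_remainders n → Spec_quadratic_remainders n (quadratic_remainders n)

-- ===== LEMMAS AND PROOFS =====

theorem ggt_eq_gcd (y x : Int) (hx : 0 ≤ x) (hy : 0 ≤ y) : ggt x y = (Int.gcd x y : Int) := by
  by_cases h : y = 0
  · subst h
    rw [ggt]
    simp [Int.gcd, Int.natAbs_of_nonneg hx]
  · have hy' : 0 < y := lt_of_le_of_ne hy (Ne.symm h)
    rw [ggt, dif_neg h]
    have hmod : PySem.Int.mod x y = x % y := PySem.Int.mod_eq_emod_of_pos hy'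
    have hrec := ggt_eq_gcd (PySem.Int.mod x y) y hy (by rw [hmod]; exact Int.emod_nonneg x (by omega))
    rw [hrec, hmod, Int.gcd_comm y, Int.gcd_emod, Int.gcd_comm]
termination_by y.natAbs
decreasing_by exact ggt_term x y h

theorem euler_phi_eq_filter (n : Int) :
    euler_phi_numbers n = (PySem.List.pyRange 0 n).filter (fun x => decide (Int.gcd n x = 1)) := by
  show List.foldl (fun acc i =>
    if ggt n (PySem.List.pyGetD (PySem.List.pyRange 0 n) i 0) = 1 then acc ++ [PySem.List.pyGetD (PySem.List.pyRange 0 n) i 0] else acc) [] (PySem.List.pyRange 0 n) = _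
  have hcong : ∀ (acc : List Int) (i : Int), i ∈ PySem.List.pyRange 0 n →
      (if ggt n (PySem.List.pyGetD (PySem.List.pyRange 0 n) i 0) = 1 then acc ++ [PySem.List.pyGetD (PySem.List.pyRange 0 n) i 0] else acc)
      = (if (fun x => decide (Int.gcd n x = 1)) i = true then acc ++ [i] else acc) := by
    intro acc i hi
    have hmem := (PySem.List.mem_pyRange_one).1 hi
    have hget : PySem.List.pyGetD (PySem.List.pyRange 0 n) i 0 = i := by
      rw [PySem.List.pyGetD_eq_getElem _ _ hmem.1 (by simp [PySem.List.length_pyRange_one]; omega)]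
      rw [PySem.List.getElem_pyRange_one]
      omega
    rw [hget, ggt_eq_gcd _ _ (by omega) hmem.1]
    simp
  rw [PySem.List.foldl_congr_mem _ _ _ _ (fun acc x hx => hcong acc x hx)]
  rw [PySem.List.foldl_append_if (fun x => decide (Int.gcd n x = 1)) (fun x => x)]
  simp

theorem mark_foldl_getElem (js : List Int) (hjs : ∀ j ∈ js, 0 ≤ j) (bs : List Bool) (k : Nat) :
    (js.foldl (fun c j => PySem.List.pySetD c j false) bs).length = bs.length ∧
    (js.foldl (fun c j => PySem.List.pySetD c j false) bs)[k]?
      = if (k : Int) ∈ js ∧ k < bs.length then some false else bs[k]? := by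
  induction js generalizing bs with
  | nil => simp
  | cons j js ih =>
    have hj : 0 ≤ j := hjs j (by simp)
    have hjs' : ∀ x ∈ js, 0 ≤ x := fun x hx => hjs x (by simp [hx])
    simp only [List.foldl_cons, PySem.List.pySetD_of_nonneg _ _ hj]
    obtain ⟨ihl, ihg⟩ := ih hjs' (bs.set j.toNat false)
    refine ⟨by rw [ihl]; simp, ?_⟩
    rw [ihg, List.getElem?_set]
    simp only [List.length_set, List.mem_cons]
    by_cases hk : (k:Int) ∈ js <;> by_cases hkl : k < bs.length <;>
      by_cases hjk : j.toNat = k <;>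
      simp_all <;> first | omega | (rw [if_neg (by omega), if_neg (by omega)])

theorem sieve_getElem (n : Int) (hn : 0 < n) (ds : List Int) (hds : ∀ d ∈ ds, 0 < d)
    (bs : List Bool) (hc : bs.length = n.toNat) (k : Nat) (hk : k < n.toNat) :
    (ds.foldl (fun c d => if PySem.Int.mod n d = 0
        then (PySem.List.pyRange 0 n d).foldl (fun c j => PySem.List.pySetD c j false) c
        else c) bs)[k]?
      = some ((bs[k]?.getD true) && !(ds.any (fun d => decide (d ∣ n) && decide (d ∣ (k : Int))))) := by
  induction ds generalizing bs with
  | nil =>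
    simp
    rw [List.getElem?_eq_getElem (by omega)]
    simp
  | cons d ds ih =>
    have hd : 0 < d := hds d (by simp)
    have hds' : ∀ x ∈ ds, 0 < x := fun x hx => hds x (by simp [hx])
    simp only [List.foldl_cons]
    by_cases hm : PySem.Int.mod n d = 0
    · rw [if_pos hm]
      have hdvdn : d ∣ n := (PySem.Int.mod_eq_zero_iff_dvd n d).1 hm
      have hjs : ∀ j ∈ PySem.List.pyRange 0 n d, 0 ≤ j := by
        intro j hj
        exact ((PySem.List.mem_pyRange_iff_of_pos hd j).1 hj).1
      obtain ⟨hlen, hget⟩ := mark_foldl_getElem (PySem.List.pyRange 0 n d) hjs bs k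
      rw [ih hds' _ (by rw [hlen, hc])]
      rw [hget]
      have hmem : ((k : Int) ∈ PySem.List.pyRange 0 n d) ↔ d ∣ (k : Int) := by
        rw [PySem.List.mem_pyRange_iff_of_pos hd]
        constructor
        · intro h; simpa using h.2.2
        · intro h; exact ⟨by omega, by omega, by simpa using h⟩
      have hkb : k < bs.length := by omega
      by_cases hdk : d ∣ (k : Int)
      · rw [if_pos ⟨hmem.2 hdk, hkb⟩]
        simp [hdk, hdvdn]
      · rw [if_neg (by rw [hmem]; tauto)]
        simp [hdk]
    · rw [if_neg hm]
      rw [ih hds' _ hc]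
      have : ¬ d ∣ n := by rw [← PySem.Int.mod_eq_zero_iff_dvd]; exact hm
      simp [this]

theorem divisor_test_iff (n x : Int) (hn : 0 < n) :
    ((PySem.List.pyRange 2 (n + 1)).any (fun d => decide (d ∣ n) && decide (d ∣ x))) = false
      ↔ Int.gcd n x = 1 := by
  rw [List.any_eq_false]
  constructor
  · intro h
    by_contra hg
    have hg0 : Int.gcd n x ≠ 0 := by
      intro h0
      rw [Int.gcd_eq_zero_iff] at h0
      omega
    have h2 : (2 : Int) ≤ (Int.gcd n x : Int) := by
      have : Int.gcd n x ≠ 1 := hg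
      omega
    have hdn : ((Int.gcd n x : Int)) ∣ n := Int.gcd_dvd_left n x
    have hle : ((Int.gcd n x : Int)) ≤ n := Int.le_of_dvd hn hdn
    have hmem : ((Int.gcd n x : Int)) ∈ PySem.List.pyRange 2 (n + 1) := by
      rw [PySem.List.mem_pyRange_one]
      omega
    have hco := h _ hmem
    simp [hdn, Int.gcd_dvd_right] at hco
  · intro h1 d hd
    rw [PySem.List.mem_pyRange_one] at hd
    simp only [Bool.and_eq_true, decide_eq_true_eq, not_and]
    intro hdn hdx
    have hdg : d.toNat ∣ Int.gcd n x :=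
      Int.dvd_gcd (by rwa [Int.toNat_of_nonneg (by omega)]) (by rwa [Int.toNat_of_nonneg (by omega)])
    rw [h1] at hdg
    have := Nat.le_of_dvd one_pos hdg
    omega

theorem sieve_length (n : Int) (ds : List Int) (hds : ∀ d ∈ ds, 0 < d) (bs : List Bool) :
    (ds.foldl (fun c d => if PySem.Int.mod n d = 0
        then (PySem.List.pyRange 0 n d).foldl (fun c j => PySem.List.pySetD c j false) c
        else c) bs).length = bs.length := by
  induction ds generalizing bs with
  | nil => rfl
  | cons d ds ih =>
    have hd : 0 < d := hds d (by simp)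
    have hds' : ∀ x ∈ ds, 0 < x := fun x hx => hds x (by simp [hx])
    simp only [List.foldl_cons]
    by_cases hm : PySem.Int.mod n d = 0
    · rw [if_pos hm, ih hds']
      exact (mark_foldl_getElem _ (fun j hj => ((PySem.List.mem_pyRange_iff_of_pos hd j).1 hj).1) bs 0).1
    · rw [if_neg hm, ih hds']

theorem Z_alt_eq (n : Int) :
    (PySem.List.pyRange 0 n).filter (fun x => PySem.List.pyGetD
        ((PySem.List.pyRange 2 (n + 1)).foldl
          (fun c d => if PySem.Int.mod n d = 0
            then (PySem.List.pyRange 0 n d).foldl (fun c j => PySem.List.pySetD c j false) c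
            else c) (PySem.List.pyRepeat [true] n)) x false)
      = (PySem.List.pyRange 0 n).filter (fun x => decide (Int.gcd n x = 1)) := by
  apply List.filter_congr
  intro x hx
  have hmem := (PySem.List.mem_pyRange_one).1 hx
  have hn : 0 < n := by omega
  have hds : ∀ d ∈ PySem.List.pyRange 2 (n + 1), 0 < d := by
    intro d hd
    have := (PySem.List.mem_pyRange_one).1 hd
    omega
  have hrep : (PySem.List.pyRepeat [true] n).length = n.toNat := by
    rw [PySem.List.pyRepeat_singleton]; simp
  have hlen := sieve_length n (PySem.List.pyRange 2 (n + 1)) hds (PySem.List.pyRepeat [true] n)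
  have hkn : x.toNat < n.toNat := by omega
  have hg := sieve_getElem n hn (PySem.List.pyRange 2 (n + 1)) hds (PySem.List.pyRepeat [true] n)
    (by rw [hrep]) x.toNat hkn
  rw [PySem.List.pyGetD_eq_getElem _ _ hmem.1 (by rw [hlen, hrep]; omega)]
  have hx' : ((x.toNat : Int)) = x := Int.toNat_of_nonneg hmem.1
  rw [hx'] at hg
  have hreptrue : (PySem.List.pyRepeat [true] n)[x.toNat]?.getD true = true := by
    rw [PySem.List.pyRepeat_singleton, List.getElem?_replicate]
    simp [hkn]
  rw [hreptrue] at hg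
  have hgetelem := List.getElem?_eq_getElem (l := ((PySem.List.pyRange 2 (n + 1)).foldl
          (fun c d => if PySem.Int.mod n d = 0
            then (PySem.List.pyRange 0 n d).foldl (fun c j => PySem.List.pySetD c j false) c
            else c) (PySem.List.pyRepeat [true] n))) (i := x.toNat) (by rw [hlen, hrep]; omega)
  rw [hgetelem] at hg
  have hval := Option.some.inj hg
  rw [hval]
  have hiff := divisor_test_iff n x hn
  by_cases hgcd : Int.gcd n x = 1
  · simp [hgcd, hiff.2 hgcd]
  · simp only [Bool.true_and]
    have : ((PySem.List.pyRange 2 (n + 1)).any fun d => decide (d ∣ n) && decide (d ∣ x)) = true := by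
      rcases Bool.eq_false_or_eq_true _ with h | h
      · exact h
      · exact absurd (hiff.1 h) hgcd
    rw [this]
    simp [hgcd]

def pvR (n x : Int) : Int := PySem.Int.mod (x * x) n
def pvZ (n : Int) : List Int := (PySem.List.pyRange 0 n).filter (fun x => decide (Int.gcd n x = 1))
def pvGrp (n k : Int) : List Int := (pvZ n).filter (fun x => pvR n x == k)
def pvPF (n k : Int) : Int × List Int := (k, pvGrp n k)

theorem pvZ_pairwise (n : Int) : (pvZ n).Pairwise (· < ·) :=
  List.Pairwise.filter _ (PySem.List.pairwise_lt_pyRange_one 0 n)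

theorem pvZ_nodup (n : Int) : (pvZ n).Nodup :=
  (pvZ_pairwise n).imp (fun h => ne_of_lt h)

theorem pvZ_mem (n x : Int) : x ∈ pvZ n ↔ (0 ≤ x ∧ x < n ∧ Int.gcd n x = 1) := by
  simp [pvZ, List.mem_filter, PySem.List.mem_pyRange_one, and_assoc]

theorem pvR_mem (n x : Int) (hx : x ∈ pvZ n) : pvR n x ∈ pvZ n := by
  rw [pvZ_mem] at hx ⊢
  obtain ⟨h0, h1, hg⟩ := hx
  have hn : 0 < n := by omega
  have hmod : pvR n x = (x * x) % n := PySem.Int.mod_eq_emod_of_pos hn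
  refine ⟨by rw [hmod]; exact Int.emod_nonneg _ (by omega), by rw [hmod]; exact Int.emod_lt_of_pos _ hn, ?_⟩
  rw [hmod, Int.gcd_comm, Int.gcd_emod, Int.gcd_comm]
  have : Nat.Coprime n.natAbs x.natAbs := hg
  have := Nat.Coprime.mul_right this this
  simpa [Int.gcd, Int.natAbs_mul] using this

theorem dict_insert_eq_self (d : PySem.Dict Int (List Int)) (k : Int) (v : List Int)
    (hnd : d.keys.Nodup) (h : d.get? k = some v) : d.insert k v = d := by
  apply PySem.Dict.ext
  rw [PySem.Dict.items_insert_of_contains _ _ (by rw [PySem.Dict.contains_eq_isSome_get?, h]; rfl)]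
  have : ∀ p ∈ d.items, (if (p.1 == k) = true then (k, v) else p) = p := by
    intro p hp
    by_cases hpk : p.1 = k
    · have hmem : (p.1, p.2) ∈ d.items := hp
      have := PySem.Dict.get?_of_mem_items d hmem hnd
      rw [hpk, h] at this
      have hv : v = p.2 := by injection this
      rw [if_pos (by simp [hpk]), hv, ← hpk]
    · simp [hpk]
  rw [List.map_congr_left this]; simp

theorem d0_items (n : Int) :
    ((pvZ n).foldl (fun d k => d.insert k ([] : List Int)) PySem.Dict.empty).items
      = (pvZ n).map (fun k => (k, ([] : List Int))) := by
  have := PySem.Dict.items_foldl_insert_fresh (pvZ n) (fun k => k) (fun _ => ([] : List Int))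
    PySem.Dict.empty (fun a _ => PySem.Dict.contains_empty a) (by simpa using pvZ_nodup n)
  simpa using this

theorem d0_keys (n : Int) :
    ((pvZ n).foldl (fun d k => d.insert k ([] : List Int)) PySem.Dict.empty).keys = pvZ n := by
  show (((pvZ n).foldl (fun d k => d.insert k ([] : List Int)) PySem.Dict.empty).items.map Prod.fst) = pvZ n
  rw [d0_items]
  simp [Function.comp_def]

theorem d0_get? (n : Int) (k : Int) (hk : k ∈ pvZ n) :
    ((pvZ n).foldl (fun d k => d.insert k ([] : List Int)) PySem.Dict.empty).get? k
      = some ([] : List Int) := by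
  apply PySem.Dict.get?_of_mem_items
  · rw [d0_items]
    exact List.mem_map.2 ⟨k, hk, rfl⟩
  · rw [d0_keys]; exact pvZ_nodup n

theorem d0_getD (n : Int) (c : Int) :
    ((pvZ n).foldl (fun d k => d.insert k ([] : List Int)) PySem.Dict.empty).getD c []
      = ([] : List Int) := by
  rw [PySem.Dict.getD_eq_get?_getD]
  cases hh : ((pvZ n).foldl (fun d k => d.insert k ([] : List Int)) PySem.Dict.empty).get? c with
  | none => rfl
  | some v =>
    have hmem := PySem.Dict.mem_items_of_get?_eq_some _ hh
    rw [d0_items] at hmem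
    obtain ⟨x, -, hx⟩ := List.mem_map.1 hmem
    cases hx
    simp

theorem noop_foldl_insert (ks : List Int) (d : PySem.Dict Int (List Int))
    (h : ∀ k ∈ ks, d.insert k ([] : List Int) = d) :
    ks.foldl (fun d key => d.insert key ([] : List Int)) d = d := by
  induction ks with
  | nil => rfl
  | cons k ks ih =>
    simp only [List.foldl_cons, h k (by simp)]
    exact ih (fun x hx => h x (by simp [hx]))

theorem set_update_of_mem (l : List Int) (s : PySem.Set Int) (h : ∀ x ∈ l, x ∈ s) :
    PySem.Set.update s l = s := by
  induction l generalizing s with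
  | nil => rfl
  | cons x l ih =>
    have hadd : PySem.Set.add s x = s := by
      unfold PySem.Set.add PySem.Set.contains
      simp [h x (by simp)]
    show List.foldl PySem.Set.add (PySem.Set.add s x) l = s
    rw [hadd]
    exact ih s (fun y hy => h y (by simp [hy]))

theorem group_getD (n : Int) (d : PySem.Dict Int (List Int)) (c : Int) :
    ((pvZ n).foldl (fun d x => d.modify (pvR n x) [] (fun v => v ++ [x])) d).getD c []
      = d.getD c [] ++ pvGrp n c := by
  have hfold : (pvZ n).foldl (fun d x => d.modify (pvR n x) [] (fun v => v ++ [x])) d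
      = ((pvZ n).map (fun x => (pvR n x, x))).foldl
          (fun d p => d.modify p.1 [] (fun v => v ++ [p.2])) d := by
    rw [List.foldl_map]
  rw [hfold, PySem.Dict.getD_foldl_modify_append]
  unfold pvGrp
  rw [List.filter_map]
  simp [Function.comp_def]

theorem group_keys (n : Int) (d : PySem.Dict Int (List Int)) :
    ((pvZ n).foldl (fun d x => d.modify (pvR n x) [] (fun v => v ++ [x])) d).keys
      = PySem.Set.update d.keys ((pvZ n).map (pvR n)) := by
  exact PySem.Dict.keys_foldl_modify_key (pvZ n) (pvR n) [] (fun _ x v => v ++ [x]) d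

theorem group_nodup (n : Int) (d : PySem.Dict Int (List Int)) (h : d.keys.Nodup) :
    ((pvZ n).foldl (fun d x => d.modify (pvR n x) [] (fun v => v ++ [x])) d).keys.Nodup :=
  PySem.Dict.nodup_keys_foldl_modify_key (pvZ n) (pvR n) [] (fun _ x v => v ++ [x]) d h

theorem erase_foldl_items (ks : List Int) (d : PySem.Dict Int (List Int)) (hnd : d.keys.Nodup) :
    (ks.foldl (fun d k => if d.getD k [] = [] then d.erase k else d) d).items
      = d.items.filter (fun p => decide (¬(p.1 ∈ ks ∧ p.2 = []))) := by
  induction ks generalizing d with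
  | nil => simp
  | cons k ks ih =>
    simp only [List.foldl_cons]
    by_cases hk : d.getD k [] = []
    · rw [if_pos hk]
      have herase : (d.erase k).items = d.items.filter (fun p => !(p.1 == k)) := rfl
      have hnd' : (d.erase k).keys.Nodup := by
        show ((d.erase k).items.map Prod.fst).Nodup
        rw [herase]
        exact ((List.filter_sublist (l := d.items)).map Prod.fst).nodup hnd
      rw [ih _ hnd', herase, List.filter_filter]
      apply List.filter_congr
      intro p hp
      by_cases hpk : p.1 = k
      · have hp2 : p.2 = [] := by
          have := PySem.Dict.get?_of_mem_items d (k := p.1) (v := p.2) hp hnd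
          rw [hpk] at this
          rw [PySem.Dict.getD_eq_get?_getD, this] at hk
          simpa using hk
        simp [hpk, hp2]
      · simp [hpk]
    · rw [if_neg hk]
      rw [ih _ hnd]
      apply List.filter_congr
      intro p hp
      by_cases hpk : p.1 = k
      · have hp2 : p.2 ≠ [] := by
          have := PySem.Dict.get?_of_mem_items d (k := p.1) (v := p.2) hp hnd
          rw [hpk] at this
          rw [PySem.Dict.getD_eq_get?_getD, this] at hk
          simpa using hk
        simp [hpk, hp2]
      · simp [hpk]

-- expansion helpers: name the intermediate values of each port (definitionally equal to the ports)

def pvZA (n : Int) : List Int := euler_phi_numbers n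
def pvRemA (n : Int) : List Int := (pvZA n).foldl (fun acc i => acc ++ [PySem.Int.mod (i ^ 2) n]) []
def pvDA0 (n : Int) : PySem.Dict Int (List Int) :=
  (PySem.List.sorted (pvZA n) (fun x => x)).foldl (fun d k => d.insert k []) PySem.Dict.empty
def pvDA1 (n : Int) : PySem.Dict Int (List Int) :=
  (pvDA0 n).keys.foldl (fun d key => d.insert key []) (pvDA0 n)
def pvDA2 (n : Int) : PySem.Dict Int (List Int) :=
  (PySem.List.pyRange 0 (PySem.List.len (pvRemA n))).foldl
    (fun d ri => d.modify (PySem.List.pyGetD (pvRemA n) ri 0) []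
        (fun v => v ++ [PySem.List.pyGetD (pvZA n) ri 0])) (pvDA1 n)
def pvDA3 (n : Int) : PySem.Dict Int (List Int) :=
  (pvDA2 n).keys.foldl (fun d key => if d.getD key [] = [] then d.erase key else d) (pvDA2 n)

def pvCB (n : Int) : List Bool :=
  (PySem.List.pyRange 2 (n + 1)).foldl
    (fun c d => if PySem.Int.mod n d = 0
      then (PySem.List.pyRange 0 n d).foldl (fun c j => PySem.List.pySetD c j false) c
      else c)
    (PySem.List.pyRepeat [true] n)
def pvZB (n : Int) : List Int :=
  (PySem.List.pyRange 0 n).filter (fun x => PySem.List.pyGetD (pvCB n) x false)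
def pvGrpB (n : Int) : PySem.Dict Int (List Int) :=
  (pvZB n).foldl
    (fun d x => d.modify (PySem.Int.mod (x * x) n) [] (fun v => v ++ [x]))
    PySem.Dict.empty

theorem portA_expand (n : Int) :
    quadratic_remainders n = (pvRemA n, (pvDA3 n).items, pvZA n) := rfl

theorem portB_expand (n : Int) :
    quadratic_remainders_alt n
      = ((pvZB n).map (fun x => PySem.Int.mod (x * x) n),
         PySem.List.sorted (pvGrpB n).items (fun p => p.1), pvZB n) := rfl

theorem pvZA_eq (n : Int) : pvZA n = pvZ n := euler_phi_eq_filter n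

theorem pvZB_eq (n : Int) : pvZB n = pvZ n := Z_alt_eq n

theorem pvRemA_eq (n : Int) : pvRemA n = (pvZ n).map (pvR n) := by
  unfold pvRemA
  rw [pvZA_eq, PySem.List.foldl_append_singleton_eq_map]
  simp only [List.nil_append]
  apply List.map_congr_left
  intro i _
  show PySem.Int.mod (i ^ 2) n = PySem.Int.mod (i * i) n
  rw [pow_two]

def pvSA (n : Int) : List Int := (pvZ n).filter (fun k => !decide (pvGrp n k = []))

theorem pvDA1_eq (n : Int) : pvDA1 n = pvDA0 n := by
  unfold pvDA1
  have hk : (pvDA0 n).keys = pvZ n := by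
    unfold pvDA0
    rw [pvZA_eq, PySem.List.sorted_eq_of_perm_of_pairwise_lt (pvZ n) (pvZ n) (fun x => x)
      (List.Perm.refl _) (pvZ_pairwise n)]
    exact d0_keys n
  rw [hk]
  apply noop_foldl_insert
  intro k hkmem
  apply dict_insert_eq_self
  · rw [hk]; exact pvZ_nodup n
  · unfold pvDA0
    rw [pvZA_eq, PySem.List.sorted_eq_of_perm_of_pairwise_lt (pvZ n) (pvZ n) (fun x => x)
      (List.Perm.refl _) (pvZ_pairwise n)]
    exact d0_get? n k hkmem

theorem pvDA0_eq_fold (n : Int) :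
    pvDA0 n = (pvZ n).foldl (fun d k => d.insert k ([] : List Int)) PySem.Dict.empty := by
  unfold pvDA0
  rw [pvZA_eq, PySem.List.sorted_eq_of_perm_of_pairwise_lt (pvZ n) (pvZ n) (fun x => x)
    (List.Perm.refl _) (pvZ_pairwise n)]

theorem pvDA2_eq (n : Int) :
    pvDA2 n = (pvZ n).foldl (fun d x => d.modify (pvR n x) [] (fun v => v ++ [x])) (pvDA0 n) := by
  unfold pvDA2
  rw [pvDA1_eq, pvRemA_eq, pvZA_eq]
  rw [show PySem.List.len ((pvZ n).map (pvR n)) = PySem.List.len (pvZ n) by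
    simp [PySem.List.len_eq]]
  rw [PySem.List.foldl_congr_mem _ _
    (fun d ri => d.modify (pvR n (PySem.List.pyGetD (pvZ n) ri 0)) []
        (fun v => v ++ [PySem.List.pyGetD (pvZ n) ri 0])) _ ?_]
  · rw [PySem.List.foldl_pyRange_pyGetD (pvZ n) 0
      (fun d x => d.modify (pvR n x) [] (fun v => v ++ [x])) (pvDA0 n) le_rfl]
    simp
  · intro acc ri hri
    have hmem := (PySem.List.mem_pyRange_one).1 hri
    have hlt : ri < ((pvZ n).length : Int) := by
      have := hmem.2
      simpa [PySem.List.len_eq] using this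
    have h1 : PySem.List.pyGetD ((pvZ n).map (pvR n)) ri 0 = pvR n (PySem.List.pyGetD (pvZ n) ri 0) := by
      rw [PySem.List.pyGetD_eq_getElem _ _ hmem.1 (by simpa using hlt), List.getElem_map,
          PySem.List.pyGetD_eq_getElem _ _ hmem.1 hlt]
    simp only [h1]

theorem pvDA2_keys (n : Int) : (pvDA2 n).keys = pvZ n := by
  rw [pvDA2_eq, group_keys, pvDA0_eq_fold, d0_keys]
  apply set_update_of_mem
  intro x hx
  obtain ⟨y, hy, hxy⟩ := List.mem_map.1 hx
  rw [← hxy]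
  exact pvR_mem n y hy

theorem pvDA2_nodup (n : Int) : (pvDA2 n).keys.Nodup := by
  rw [pvDA2_keys]; exact pvZ_nodup n

theorem pvDA2_getD (n : Int) (c : Int) : (pvDA2 n).getD c [] = pvGrp n c := by
  rw [pvDA2_eq, group_getD, pvDA0_eq_fold, d0_getD]
  simp

theorem pvDA2_items (n : Int) : (pvDA2 n).items = (pvZ n).map (pvPF n) := by
  rw [PySem.Dict.items_eq_map_keys (pvDA2 n) (pvDA2_nodup n) []]
  rw [pvDA2_keys]
  apply List.map_congr_left
  intro k _
  rw [pvDA2_getD]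
  rfl

theorem pvDA3_items (n : Int) : (pvDA3 n).items = (pvSA n).map (pvPF n) := by
  unfold pvDA3
  rw [pvDA2_keys, erase_foldl_items _ _ (pvDA2_nodup n), pvDA2_items]
  rw [List.filter_map]
  unfold pvSA
  rw [List.filter_congr (q := fun k => !decide (pvGrp n k = []))]
  intro k hk
  simp [pvPF, hk]

theorem pvGrpB_items (n : Int) :
    (pvGrpB n).items = (PySem.Set.ofList ((pvZ n).map (pvR n))).map (pvPF n) := by
  have hfold : pvGrpB n
      = (pvZ n).foldl (fun d x => d.modify (pvR n x) [] (fun v => v ++ [x])) PySem.Dict.empty := by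
    unfold pvGrpB
    rw [pvZB_eq]
    rfl
  have hnodup : (pvGrpB n).keys.Nodup := by
    rw [hfold]
    exact group_nodup n _ (by simp [PySem.Dict.keys_empty])
  have hkeys : (pvGrpB n).keys = PySem.Set.ofList ((pvZ n).map (pvR n)) := by
    rw [hfold, group_keys]
    rfl
  rw [PySem.Dict.items_eq_map_keys (pvGrpB n) hnodup [], hkeys]
  apply List.map_congr_left
  intro k _
  rw [hfold, group_getD]
  simp [pvPF, PySem.Dict.getD_empty]

theorem pvSA_perm (n : Int) :
    ((pvSA n).map (pvPF n)).Perm (pvGrpB n).items := by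
  rw [pvGrpB_items]
  apply List.Perm.map
  unfold pvSA
  rw [List.perm_ext_iff_of_nodup
    ((pvZ_nodup n).filter _) (PySem.Set.nodup_ofList _)]
  intro k
  rw [PySem.Set.mem_ofList]
  constructor
  · intro hk
    have hmem := List.mem_filter.1 hk
    have hne : pvGrp n k ≠ [] := by simpa using hmem.2
    obtain ⟨x, hx⟩ := List.exists_mem_of_ne_nil _ hne
    have hxf := List.mem_filter.1 hx
    exact List.mem_map.2 ⟨x, hxf.1, by simpa using hxf.2⟩
  · intro hk
    obtain ⟨x, hx, hxr⟩ := List.mem_map.1 hk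
    apply List.mem_filter.2
    refine ⟨by rw [← hxr]; exact pvR_mem n x hx, ?_⟩
    have : x ∈ pvGrp n k := List.mem_filter.2 ⟨hx, by simp [hxr]⟩
    have hne : pvGrp n k ≠ [] := by
      intro hnil
      rw [hnil] at this
      exact absurd this (List.not_mem_nil)
    simp [hne]

theorem pvSorted_eq (n : Int) :
    PySem.List.sorted (pvGrpB n).items (fun p => p.1) = (pvSA n).map (pvPF n) := by
  apply PySem.List.sorted_eq_of_perm_of_pairwise_lt
  · exact pvSA_perm n
  · have hpw : (pvSA n).Pairwise (· < ·) := List.Pairwise.filter _ (pvZ_pairwise n)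
    rw [List.pairwise_map]
    exact hpw.imp (fun h => by simpa [pvPF] using h)

-- ===== VERDICT (by name: the statement is the Claim_ definition above) =====
theorem quadratic_remainders_spec : Claim_equal_quadratic_remainders := by
  intro n _
  unfold Spec_quadratic_remainders
  rw [portA_expand, portB_expand]
  refine congrArg₂ Prod.mk ?_ (congrArg₂ Prod.mk ?_ ?_)
  · rw [pvRemA_eq, pvZB_eq]
    rfl
  · rw [pvDA3_items, pvSorted_eq]
  · rw [pvZA_eq, pvZB_eq]
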